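-- pv_equiv track=rewrite | github.com/seokhohong/missing-word | semantic/makeFeatures.py | getModWindows
-- ===== SOURCE A (Python) =====
-- def getModWindows(tokens, windowSize, default = ""):
--     windows = []
--     for i in range(len(tokens) - 1):
--         window = []
--         for j in range(-windowSize, windowSize + 1):
--             if j == 0:
--                 continue
--             window.append(getElem(tokens, i + j, default))
--         windows.append(window)
--     return windows
--
-- def getElem(elems, index, default = ""):
--     if index < 0 or index >= len(elems):
--         return default
--     return elems[index]
-- ===== SOURCE B (Python) =====
-- def getModWindows(tokens, windowSize, default = ""):
--     m = max(windowSize, 0)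
--     padded = [default] * m + list(tokens) + [default] * m
--     return [padded[i:i + m] + padded[i + m + 1:i + 2 * m + 1]
--             for i in range(len(tokens) - 1)]
-- ===== Notes on version B (the rewrite author's own statement) =====
-- stated objective: simpler
-- what changed: Replaces the nested per-index loop with bounds-checking getElem by a once-built padded list and two slices per position (a list comprehension, no helper and no inner loop).
import Mathlib
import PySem

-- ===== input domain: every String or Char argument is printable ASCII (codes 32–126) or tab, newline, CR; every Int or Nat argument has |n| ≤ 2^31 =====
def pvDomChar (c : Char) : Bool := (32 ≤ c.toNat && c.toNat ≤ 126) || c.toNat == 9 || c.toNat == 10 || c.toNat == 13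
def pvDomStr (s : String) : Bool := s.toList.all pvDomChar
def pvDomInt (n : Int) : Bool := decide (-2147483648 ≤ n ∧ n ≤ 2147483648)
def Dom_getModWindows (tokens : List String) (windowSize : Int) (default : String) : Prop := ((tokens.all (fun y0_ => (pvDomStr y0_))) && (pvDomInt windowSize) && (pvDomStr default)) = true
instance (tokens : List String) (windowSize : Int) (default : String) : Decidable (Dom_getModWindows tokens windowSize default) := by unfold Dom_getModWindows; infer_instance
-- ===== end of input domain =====

-- B replaces A's nested loop with bounds-checked element access by a padded list and two slices per position (objective: simpler).

-- ===== PORT A =====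
def getElemA (elems : List String) (index : Int) (default : String) : String :=
  if index < 0 ∨ (elems.length : Int) ≤ index then default
  else PySem.List.pyGetD elems index default

def getModWindows (tokens : List String) (windowSize : Int) (default : String) : List (List String) :=
  (PySem.List.pyRange 0 ((tokens.length : Int) - 1) 1).foldl
    (fun windows i =>
      windows ++ [ (PySem.List.pyRange (-windowSize) (windowSize + 1) 1).foldl
        (fun window j =>
          if j = 0 then window
          else window ++ [getElemA tokens (i + j) default]) [] ])
    []

-- ===== PORT B =====
def getModWindows_alt (tokens : List String) (windowSize : Int) (default : String) : List (List String) :=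
  let m : Int := max windowSize 0
  let padded : List String := List.replicate m.toNat default ++ tokens ++ List.replicate m.toNat default
  (PySem.List.pyRange 0 ((tokens.length : Int) - 1) 1).map
    (fun i => PySem.List.slice padded (some i) (some (i + m))
           ++ PySem.List.slice padded (some (i + m + 1)) (some (i + 2 * m + 1)))

-- ===== PRECONDITION & SPEC =====
def Spec_getModWindows (tokens : List String) (windowSize : Int) (default : String) (out : List (List String)) : Prop := out = getModWindows_alt tokens windowSize default
instance (tokens : List String) (windowSize : Int) (default : String) (out : List (List String)) : Decidable (Spec_getModWindows tokens windowSize default out) := by unfold Spec_getModWindows; infer_instance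

-- ===== CLAIM (what is proved, stated in full; the proofs are below) =====
def Claim_equal_getModWindows : Prop := ∀ (tokens : List String) (windowSize : Int) (default : String), Dom_getModWindows tokens windowSize default → Spec_getModWindows tokens windowSize default (getModWindows tokens windowSize default)

-- ===== LEMMAS AND PROOFS =====

lemma slice_eq_map_pyRange (xs : List String) (a b : Int) (d : String)
    (ha : 0 ≤ a) (hab : a ≤ b) (hb : b ≤ (xs.length : Int)) :
    PySem.List.slice xs (some a) (some b)
      = (PySem.List.pyRange a b 1).map (fun t => xs.getD t.toNat d) := by
  rw [PySem.List.slice_toNat xs ha (le_trans ha hab)]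
  apply List.ext_getElem
  · simp [PySem.List.length_pyRange_one]
    omega
  · intro k h1 h2
    simp only [List.getElem_take, List.getElem_drop, List.getElem_map,
      PySem.List.getElem_pyRange_one]
    have hk : (a + k).toNat = a.toNat + k := by
      simp [PySem.List.length_pyRange_one] at h2; omega
    have : a.toNat + k < xs.length := by
      simp [PySem.List.length_pyRange_one] at h2; omega
    rw [hk, List.getD_eq_getElem _ _ this]


lemma padded_getD (tokens : List String) (d : String) (m : Nat) (t : Int)
    (ht0 : 0 ≤ t) (ht : t < (tokens.length : Int) + 2 * m) :
    (List.replicate m d ++ tokens ++ List.replicate m d).getD t.toNat d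
      = getElemA tokens (t - m) d := by
  have hk : t.toNat < (List.replicate m d ++ tokens ++ List.replicate m d).length := by
    simp; omega
  rw [List.getD_eq_getElem _ _ hk]
  simp only [List.getElem_append, List.length_append, List.length_replicate, List.getElem_replicate]
  unfold getElemA
  split_ifs with h1 h2 h3 h4 h5 <;> simp_all <;> try omega
  · rw [PySem.List.pyGetD_eq_getElem _ _ (by omega) (by omega)]
    congr 1; omega


lemma window_eq (tokens : List String) (w : Int) (d : String) (i : Int) (hi : 0 ≤ i)
    (hin : i < (tokens.length : Int) - 1) :
    (PySem.List.pyRange (-w) (w + 1) 1).foldl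
      (fun window j => if j = 0 then window else window ++ [getElemA tokens (i + j) d]) []
    = PySem.List.slice (List.replicate (max w 0).toNat d ++ tokens ++ List.replicate (max w 0).toNat d)
        (some i) (some (i + max w 0))
      ++ PySem.List.slice (List.replicate (max w 0).toNat d ++ tokens ++ List.replicate (max w 0).toNat d)
        (some (i + max w 0 + 1)) (some (i + 2 * max w 0 + 1)) := by
  have hfun : (fun (window : List String) (j : Int) =>
        if j = 0 then window else window ++ [getElemA tokens (i + j) d])
      = (fun window j => if (!(j == 0)) = true then window ++ [getElemA tokens (i + j) d] else window) := by
    funext window j; split_ifs <;> simp_all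
  rw [hfun, PySem.List.foldl_append_if]
  rcases (by omega : w ≤ 0 ∨ 0 < w) with hw | hw
  · -- window size ≤ 0 : both sides empty
    have hm : max w 0 = 0 := by omega
    rw [hm]
    rw [PySem.List.slice_toNat _ hi (by omega), PySem.List.slice_toNat _ (by omega) (by omega)]
    simp only [add_zero, mul_zero, Int.toNat_zero, Nat.sub_self, List.take_zero, List.append_nil,
      List.nil_append]
    rcases (by omega : w = 0 ∨ w < 0) with hw0 | hw0
    · subst hw0
      rw [neg_zero, zero_add, PySem.List.pyRange_one_cons (by omega : (0:Int) < 1),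
          PySem.List.pyRange_one_eq_nil (by omega : (1:Int) ≤ 0 + 1)]
      simp
    · rw [PySem.List.pyRange_one_eq_nil (by omega)]; simp
  · -- positive window
    have hm : max w 0 = w := by omega
    rw [hm]
    have hsplit : PySem.List.pyRange (-w) (w+1) 1
        = PySem.List.pyRange (-w) 0 1 ++ PySem.List.pyRange 0 (w+1) 1 :=
      PySem.List.pyRange_one_append (-w) 0 (w+1) (by omega) (by omega)
    rw [hsplit, PySem.List.pyRange_one_cons (by omega : (0:Int) < w + 1)]
    rw [List.filter_append, List.filter_cons]
    simp only [beq_self_eq_true, Bool.not_true, Bool.false_eq_true, if_false]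
    rw [List.filter_eq_self.mpr (fun j hj => by
        rw [PySem.List.mem_pyRange_one] at hj; simp; omega)]
    rw [List.filter_eq_self.mpr (fun j hj => by
        rw [PySem.List.mem_pyRange_one] at hj; simp; omega)]
    rw [(by norm_num : (0:Int) + 1 = 1)]
    have hL : List.map (fun j => getElemA tokens (i + j) d) (PySem.List.pyRange (-w) 0 1)
        = PySem.List.slice (List.replicate w.toNat d ++ tokens ++ List.replicate w.toNat d)
            (some i) (some (i + w)) := by
      rw [slice_eq_map_pyRange _ _ _ d hi (by omega) (by simp; omega)]
      rw [PySem.List.pyRange_one (-w) 0, PySem.List.pyRange_one i (i+w),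
          (by omega : (0 - -w).toNat = w.toNat), (by omega : (i + w - i).toNat = w.toNat)]
      simp only [List.map_map]
      apply List.map_congr_left
      intro k hk
      rw [List.mem_range] at hk
      simp only [Function.comp_apply]
      rw [padded_getD tokens d w.toNat (i + k) (by omega) (by omega)]
      congr 1
      omega
    have hR : List.map (fun j => getElemA tokens (i + j) d) (PySem.List.pyRange 1 (w+1) 1)
        = PySem.List.slice (List.replicate w.toNat d ++ tokens ++ List.replicate w.toNat d)
            (some (i + w + 1)) (some (i + 2 * w + 1)) := by
      rw [slice_eq_map_pyRange _ _ _ d (by omega) (by omega) (by simp; omega)]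
      rw [PySem.List.pyRange_one 1 (w+1), PySem.List.pyRange_one (i+w+1) (i+2*w+1),
          (by omega : (w + 1 - 1).toNat = w.toNat),
          (by omega : (i + 2*w + 1 - (i + w + 1)).toNat = w.toNat)]
      simp only [List.map_map]
      apply List.map_congr_left
      intro k hk
      rw [List.mem_range] at hk
      simp only [Function.comp_apply]
      rw [padded_getD tokens d w.toNat (i + w + 1 + k) (by omega) (by omega)]
      congr 1
      omega
    rw [List.map_append, hL, hR]
    simp

-- ===== VERDICT (by name: the statement is the Claim_ definition above) =====
theorem getModWindows_spec : Claim_equal_getModWindows := by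
  intro tokens w d _
  unfold Spec_getModWindows getModWindows getModWindows_alt
  rw [PySem.List.foldl_append_singleton_eq_map]
  exact List.map_congr_left (fun i hi => by
    rw [PySem.List.mem_pyRange_one] at hi
    exact window_eq tokens w d i hi.1 hi.2)
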